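-- pv_equiv track=rewrite | github.com/Linyxus/theorem-proving-data | cleanup_data.py | contain_verilog_macro
-- ===== SOURCE A (Python) =====
-- def contain_verilog_macro(content: str):
--     macro_list = [
--         '`ifdef',
--         '`ifndef',
--         '`endif',
--         '`include',
--         '`timescale',
--         '`define'
--     ]
--     for line in content.split('\n'):
--         for macro in macro_list:
--             if line.startswith(macro):
--                 return True
--     return False
-- ===== SOURCE B (Python) =====
-- def contain_verilog_macro(content: str):
--     macro_list = [
--         '`ifdef',
--         '`ifndef',
--         '`endif',
--         '`include',
--         '`timescale',
--         '`define'
--     ]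
--     return any(content.startswith(m) or ('\n' + m) in content for m in macro_list)
-- ===== Notes on version B (the rewrite author's own statement) =====
-- stated objective: idiomatic
-- what changed: Instead of splitting the content into a line list and prefix-testing each line against each macro, B does one substring scan per macro ('\n'+macro in content, plus a startswith for the first line), never materialising the line list.
import Mathlib
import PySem

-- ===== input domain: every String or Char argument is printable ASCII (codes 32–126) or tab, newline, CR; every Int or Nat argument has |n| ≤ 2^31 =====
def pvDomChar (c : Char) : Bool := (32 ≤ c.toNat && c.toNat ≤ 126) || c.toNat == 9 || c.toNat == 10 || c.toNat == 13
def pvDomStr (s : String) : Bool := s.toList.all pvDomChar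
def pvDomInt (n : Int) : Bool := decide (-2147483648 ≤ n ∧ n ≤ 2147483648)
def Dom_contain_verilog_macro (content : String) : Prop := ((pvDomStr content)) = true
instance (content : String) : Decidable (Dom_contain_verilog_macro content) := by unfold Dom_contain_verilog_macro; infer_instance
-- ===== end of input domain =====

-- B replaces the split-into-lines + per-line prefix loop by one substring scan per macro
-- ('\n'+macro in content, plus a startswith for the first line); objective: more idiomatic.


-- ===== PORT A =====
-- A's macro_list literal
def pvMacrosA : List String :=
  ["`ifdef", "`ifndef", "`endif", "`include", "`timescale", "`define"]

-- A: for line in content.split('\n'): for macro in macro_list: if line.startswith(macro): return True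
-- (split? "\n" is always some since the separator is nonempty; the early returns are the nested any)
def contain_verilog_macro (content : String) : Bool :=
  ((PySem.Str.split? content "\n").getD []).any
    (fun line => pvMacrosA.any (fun m => PySem.Str.startswith line m))

-- ===== PORT B =====
-- B: any(content.startswith(m) or ('\n' + m) in content for m in macro_list)
-- (macro_list is the same literal as A's; pvMacrosA is reused for it)
def contain_verilog_macro_alt (content : String) : Bool :=
  pvMacrosA.any (fun m =>
    PySem.Str.startswith content m || PySem.Str.isIn ("\n" ++ m) content)

-- ===== PRECONDITION & SPEC =====
def Spec_contain_verilog_macro (content : String) (out : Bool) : Prop := out = contain_verilog_macro_alt content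
instance (content : String) (out : Bool) : Decidable (Spec_contain_verilog_macro content out) := by unfold Spec_contain_verilog_macro; infer_instance

-- ===== CLAIM (what is proved, stated in full; the proofs are below) =====
def Claim_equal_contain_verilog_macro : Prop := ∀ (content : String), Dom_contain_verilog_macro content → Spec_contain_verilog_macro content (contain_verilog_macro content)

-- ===== LEMMAS AND PROOFS =====

-- PySem.Chars.splitOn.go on a one-character separator, with enough fuel, is List.splitOnP.
theorem splitOn_go_eq (c : Char) :
    ∀ (fuel : Nat) (l cur : List Char) (acc : List (List Char)), l.length < fuel →
    PySem.Chars.splitOn.go [c] fuel l cur acc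
      = acc.reverse ++ (List.splitOnP (· == c) l).modifyHead (cur.reverse ++ ·) := by
  intro fuel
  induction fuel with
  | zero => intro l cur acc h; omega
  | succ f ih =>
    intro l cur acc h
    cases l with
    | nil => simp [PySem.Chars.splitOn.go, List.splitOnP_nil]
    | cons a rest =>
      rw [PySem.Chars.splitOn.go]
      by_cases hc : a = c
      · subst hc
        simp only [List.isPrefixOf, beq_self_eq_true, Bool.true_and, if_pos, List.length_cons,
          List.length_nil, List.drop_succ_cons, List.drop_zero]
        rw [ih rest [] (cur.reverse :: acc) (by simpa using Nat.lt_of_succ_lt_succ h)]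
        simp only [List.splitOnP_cons, beq_self_eq_true, if_pos, List.reverse_cons,
          List.reverse_nil, List.nil_append, List.modifyHead_cons, List.append_assoc,
          List.singleton_append, List.append_nil]
        cases List.splitOnP (· == a) rest with
        | nil => simp
        | cons hd tl => simp
      · have hpre : [c].isPrefixOf (a :: rest) = false := by
          simp [List.isPrefixOf]; exact fun hh => (hc hh.symm).elim
        rw [hpre]
        simp only [if_neg Bool.false_ne_true]
        rw [ih rest (a :: cur) acc (by simpa using Nat.lt_of_succ_lt_succ h)]
        rw [List.splitOnP_cons]
        have hac : (a == c) = false := by simp [hc]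
        rw [hac]
        simp only [Bool.false_eq_true, if_neg, not_false_iff]
        cases List.splitOnP (· == c) rest with
        | nil => simp
        | cons hd tl => simp

theorem splitOn_eq_splitOnP (c : Char) (l : List Char) :
    PySem.Chars.splitOn l [c] = List.splitOnP (· == c) l := by
  rw [PySem.Chars.splitOn, splitOn_go_eq c _ _ _ _ (by omega)]
  cases List.splitOnP (· == c) l with
  | nil => simp
  | cons hd tl => simp

-- A newline-free list is a prefix of l iff it is a prefix of l's first line.
theorem prefix_takeWhile_iff (m : List Char) (hn : '\n' ∉ m) :
    ∀ l : List Char, (m <+: l.takeWhile (· != '\n') ↔ m <+: l) := by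
  induction m with
  | nil => intro l; simp
  | cons b m' ih =>
    intro l
    have hb : b ≠ '\n' := fun h => hn (h ▸ List.mem_cons_self ..)
    have hn' : '\n' ∉ m' := fun h => hn (List.mem_cons_of_mem _ h)
    cases l with
    | nil => simp
    | cons a l' =>
      by_cases ha : a = '\n'
      · subst ha
        simp only [List.takeWhile_cons, bne_self_eq_false, Bool.false_eq_true, if_neg,
          not_false_iff]
        constructor
        · intro h; exact absurd (List.prefix_nil.mp h) (by simp)
        · intro h; exact absurd ((List.cons_prefix_cons.mp h).1) hb
      · have : (a != '\n') = true := by simp [ha]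
        simp only [List.takeWhile_cons, this, if_pos, List.cons_prefix_cons]
        exact and_congr_right (fun _ => ih hn' l')

theorem splitOnP_head_tail (l : List Char) :
    List.splitOnP (· == '\n') l
      = l.takeWhile (· != '\n') :: (List.splitOnP (· == '\n') l).tail := by
  induction l with
  | nil => simp [List.splitOnP_nil]
  | cons a l' ih =>
    by_cases ha : a = '\n'
    · subst ha; simp [List.splitOnP_cons]
    · have h1 : (a == '\n') = false := by simp [ha]
      have h2 : (a != '\n') = true := by simp [ha]
      rw [List.splitOnP_cons, h1]
      simp only [Bool.false_eq_true, if_neg, not_false_iff]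
      rw [List.takeWhile_cons, if_pos h2]
      conv_lhs => rw [ih]
      simp

-- A newline-free m prefixes some NON-FIRST line of l iff '\n'++m occurs inside l.
theorem tail_exists_iff (m : List Char) (hn : '\n' ∉ m) :
    ∀ l : List Char,
      ((∃ ln ∈ (List.splitOnP (· == '\n') l).tail, m <+: ln) ↔ ('\n' :: m) <:+: l) := by
  intro l
  induction l with
  | nil => simp [List.splitOnP_nil]
  | cons a l' ih =>
    by_cases ha : a = '\n'
    · subst ha
      rw [List.splitOnP_cons]
      simp only [beq_self_eq_true, if_pos, List.tail_cons]
      rw [List.infix_cons_iff]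
      constructor
      · intro ⟨ln, hln, hpre⟩
        rw [splitOnP_head_tail l'] at hln
        rcases List.mem_cons.mp hln with h | h
        · subst h
          exact Or.inl (List.cons_prefix_cons.mpr ⟨rfl, (prefix_takeWhile_iff m hn l').mp hpre⟩)
        · exact Or.inr (ih.mp ⟨ln, h, hpre⟩)
      · intro h
        rcases h with h | h
        · have := (List.cons_prefix_cons.mp h).2
          refine ⟨l'.takeWhile (· != '\n'), ?_, (prefix_takeWhile_iff m hn l').mpr this⟩
          rw [splitOnP_head_tail l']; exact List.mem_cons_self ..
        · obtain ⟨ln, hln, hpre⟩ := ih.mpr h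
          refine ⟨ln, ?_, hpre⟩
          rw [splitOnP_head_tail l']; exact List.mem_cons_of_mem _ hln
    · have h1 : (a == '\n') = false := by simp [ha]
      rw [List.splitOnP_cons, h1]
      simp only [Bool.false_eq_true, if_neg, not_false_iff]
      have htail : (List.modifyHead (List.cons a) (List.splitOnP (· == '\n') l')).tail
          = (List.splitOnP (· == '\n') l').tail := by
        rw [splitOnP_head_tail l']; simp
      rw [htail, ih, List.infix_cons_iff]
      constructor
      · exact Or.inr
      · intro h
        rcases h with h | h
        · exact absurd ((List.cons_prefix_cons.mp h).1) (fun hh => ha hh.symm)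
        · exact h

-- Main characterisation: some line of l starts with newline-free m iff
-- m prefixes l or '\n'++m occurs inside l.
theorem lines_any_iff (m : List Char) (hn : '\n' ∉ m) (l : List Char) :
    (∃ ln ∈ List.splitOnP (· == '\n') l, m <+: ln) ↔ (m <+: l ∨ ('\n' :: m) <:+: l) := by
  rw [splitOnP_head_tail l]
  simp only [List.mem_cons, exists_eq_or_imp]
  rw [prefix_takeWhile_iff m hn l, tail_exists_iff m hn l]

theorem any_swap {α β : Type} (xs : List α) (ys : List β) (f : α → β → Bool) :
    xs.any (fun x => ys.any (fun y => f x y)) = ys.any (fun y => xs.any (fun x => f x y)) := by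
  rw [Bool.eq_iff_iff]
  simp only [List.any_eq_true]
  tauto

theorem key_macro (content : String) (m : List Char) (hn : '\n' ∉ m) :
    (PySem.Chars.splitOn content.toList ['\n']).any (fun cs => PySem.Chars.startswith cs m)
      = (PySem.Chars.startswith content.toList m
          || PySem.Chars.isIn ('\n' :: m) content.toList) := by
  rw [Bool.eq_iff_iff]
  simp only [List.any_eq_true, Bool.or_eq_true, PySem.Chars.startswith_iff,
    PySem.Chars.isIn_iff_infix, splitOn_eq_splitOnP]
  exact lines_any_iff m hn content.toList

-- ===== VERDICT (by name: the statement is the Claim_ definition above) =====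
theorem contain_verilog_macro_spec : Claim_equal_contain_verilog_macro := by
  intro content _
  unfold Spec_contain_verilog_macro contain_verilog_macro contain_verilog_macro_alt
  have hsplit : PySem.Str.split? content "\n"
      = some ((PySem.Chars.splitOn content.toList ['\n']).map String.ofList) := by
    simp [PySem.Str.split?, PySem.Chars.split?]
  rw [hsplit]
  simp only [Option.getD_some, List.any_map, Function.comp_def, PySem.Str.startswith_eq,
    PySem.Str.isIn_eq, String.toList_ofList, String.toList_append]
  rw [any_swap]
  simp only [pvMacrosA, List.any_cons, List.any_nil]
  rw [key_macro content "`ifdef".toList (by decide), key_macro content "`ifndef".toList (by decide),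
    key_macro content "`endif".toList (by decide), key_macro content "`include".toList (by decide),
    key_macro content "`timescale".toList (by decide), key_macro content "`define".toList (by decide)]
  rfl
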